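-- pv_equiv track=rewrite | github.com/ishan00/SiteMe | src/parser.py | taggedMaker
-- ===== SOURCE A (Python) =====
-- ltaggedStyles={"bold":"b","h2":"h2","h1":"h1","h3":"h3","h4":"h4","h5":"h5","h6":"h6","italic":"i","center":"center"}
--
-- def taggedMaker(style,content):
--     if(not style):
--         return content
--     else:
--         style=style.split(';')
--         ltagged=[]
--         htagged=[]
--         for x in style:
--             if(':' in x):
--                 htagged.append(x)
--             else:
--                 ltagged.append(x)
--         if(ltagged and htagged):
--             htagged=';'.join(htagged)+';'
--             ltaggedStart=''.join(['<'+ltaggedStyles[x]+'>' for x in ltagged])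
--             ltaggedEnd=''.join(['</'+ltaggedStyles[x]+'>' for x in ltagged[::-1]])
--             return "<div style=\""+htagged+"\">"+ltaggedStart+content+ltaggedEnd+"</div>"
--         elif(ltagged):
--             ltaggedStart=''.join(['<'+str(ltaggedStyles[x])+'>' for x in ltagged])
--             ltaggedEnd=''.join(['</'+str(ltaggedStyles[x])+'>' for x in ltagged[::-1]])
--             return ltaggedStart+content+ltaggedEnd
--         elif(htagged):
--             htagged=';'.join(htagged)+';'
--             return "<div style=\""+htagged+"\">"+content+"</div>"
-- ===== SOURCE B (Python) =====
-- ltaggedStyles={"bold":"b","h2":"h2","h1":"h1","h3":"h3","h4":"h4","h5":"h5","h6":"h6","italic":"i","center":"center"}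
--
-- def taggedMaker(style, content):
--     if not style:
--         return content
--     def go(parts):
--         # one recursive pass: wrap content in nested tags, collect style declarations
--         if not parts:
--             return content, []
--         inner, decls = go(parts[1:])
--         x = parts[0]
--         if ':' in x:
--             return inner, [x] + decls
--         t = ltaggedStyles[x]
--         return '<' + t + '>' + inner + '</' + t + '>', decls
--     inner, decls = go(style.split(';'))
--     if decls:
--         return '<div style="' + ';'.join(decls) + ';">' + inner + '</div>'
--     return inner
-- ===== Notes on version B (the rewrite author's own statement) =====
-- stated objective: alternative
-- what changed: Replaces A's partition-into-two-lists plus join-of-mapped-open/close-tags assembly (three duplicated branches) with a single recursive pass over the split parts that wraps the content in nested tags as the recursion unwinds and collects the style declarations, followed by one conditional div wrap.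
import Mathlib
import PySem

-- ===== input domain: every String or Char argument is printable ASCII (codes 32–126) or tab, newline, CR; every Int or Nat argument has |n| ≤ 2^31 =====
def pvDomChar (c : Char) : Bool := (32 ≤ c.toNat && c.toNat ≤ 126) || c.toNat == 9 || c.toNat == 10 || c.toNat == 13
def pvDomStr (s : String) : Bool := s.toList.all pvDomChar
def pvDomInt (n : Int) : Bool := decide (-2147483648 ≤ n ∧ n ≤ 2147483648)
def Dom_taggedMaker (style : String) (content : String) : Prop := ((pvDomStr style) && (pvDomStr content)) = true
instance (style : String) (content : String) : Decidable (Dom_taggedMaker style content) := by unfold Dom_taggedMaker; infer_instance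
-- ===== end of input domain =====

-- B replaces A's partition-and-join assembly (three duplicated branches) with one
-- recursive pass that wraps the content in nested tags while collecting style
-- declarations, plus a single conditional div wrap (objective: alternative).

-- ===== PORT A =====
-- module constant: ltaggedStyles dict
def ltaggedStyles : PySem.Dict String String :=
  PySem.Dict.ofList [("bold","b"),("h2","h2"),("h1","h1"),("h3","h3"),("h4","h4"),
                     ("h5","h5"),("h6","h6"),("italic","i"),("center","center")]

-- ltaggedStyles[x]; none = KeyError, excluded by Pre_; the .getD "" default is never reached under Pre_
def ltagLookup (x : String) : String := (ltaggedStyles.get? x).getD ""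

def taggedMaker (style : String) (content : String) : String :=
  if style = "" then content
  else
    let parts := (PySem.Str.split? style ";").getD []
    -- for x in style: append to htagged if ':' in x else to ltagged
    let p := parts.foldl (fun (s : List String × List String) x =>
      if PySem.Str.isIn ":" x then (s.1, s.2 ++ [x]) else (s.1 ++ [x], s.2)) ([], [])
    let ltagged := p.1
    let htagged := p.2
    if ltagged ≠ [] ∧ htagged ≠ [] then
      let htaggedS := PySem.Str.join ";" htagged ++ ";"
      let ltaggedStart := PySem.Str.join "" (ltagged.map (fun x => "<" ++ ltagLookup x ++ ">"))
      let ltaggedEnd := PySem.Str.join "" (ltagged.reverse.map (fun x => "</" ++ ltagLookup x ++ ">"))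
      "<div style=\"" ++ htaggedS ++ "\">" ++ ltaggedStart ++ content ++ ltaggedEnd ++ "</div>"
    else if ltagged ≠ [] then
      let ltaggedStart := PySem.Str.join "" (ltagged.map (fun x => "<" ++ ltagLookup x ++ ">"))
      let ltaggedEnd := PySem.Str.join "" (ltagged.reverse.map (fun x => "</" ++ ltagLookup x ++ ">"))
      ltaggedStart ++ content ++ ltaggedEnd
    else if htagged ≠ [] then
      let htaggedS := PySem.Str.join ";" htagged ++ ";"
      "<div style=\"" ++ htaggedS ++ "\">" ++ content ++ "</div>"
    else content -- unreachable: split(';') always yields ≥ 1 element (Python would return None here)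

-- ===== PORT B =====
-- Source B's inner recursive helper go(parts): returns (content wrapped in the nested
-- tags of parts' list-tags, the list of parts' style declarations)
def goTag (content : String) : List String → String × List String
  | [] => (content, [])
  | x :: rest =>
    let r := goTag content rest
    if PySem.Str.isIn ":" x then (r.1, x :: r.2)
    else
      let t := ltagLookup x
      ("<" ++ t ++ ">" ++ r.1 ++ "</" ++ t ++ ">", r.2)

def taggedMaker_alt (style : String) (content : String) : String :=
  if style = "" then content
  else
    let r := goTag content ((PySem.Str.split? style ";").getD [])
    if r.2 ≠ [] then
      "<div style=\"" ++ PySem.Str.join ";" r.2 ++ ";\">" ++ r.1 ++ "</div>"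
    else r.1

-- ===== PRECONDITION & SPEC =====
-- Pre_ excludes exactly the inputs where Python A raises KeyError: a ';'-segment of style
-- without ':' that is not a key of ltaggedStyles.
def Pre_taggedMaker (style : String) (content : String) : Prop :=
  style = "" ∨ ∀ x ∈ (PySem.Str.split? style ";").getD [],
    PySem.Str.isIn ":" x = false → (ltaggedStyles.get? x).isSome
instance (style : String) (content : String) : Decidable (Pre_taggedMaker style content) := by
  unfold Pre_taggedMaker; infer_instance
def pvWitness_taggedMaker : String × String := ("bold;color:red;italic", "hi")

def Spec_taggedMaker (style : String) (content : String) (out : String) : Prop := out = taggedMaker_alt style content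
instance (style : String) (content : String) (out : String) : Decidable (Spec_taggedMaker style content out) := by unfold Spec_taggedMaker; infer_instance

-- ===== CLAIM =====
def Claim_equal_taggedMaker : Prop := ∀ (style : String) (content : String), Dom_taggedMaker style content → Pre_taggedMaker style content → Spec_taggedMaker style content (taggedMaker style content)

-- ===== LEMMAS AND PROOFS =====

-- A's single loop with two accumulators is a pair of filters
theorem partition_eq (parts : List String) :
    parts.foldl (fun (s : List String × List String) x =>
      if PySem.Str.isIn ":" x then (s.1, s.2 ++ [x]) else (s.1 ++ [x], s.2)) ([], [])
    = (parts.filter (fun x => !PySem.Str.isIn ":" x),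
       parts.filter (fun x => PySem.Str.isIn ":" x)) := by
  have h : (fun (s : List String × List String) x =>
      if PySem.Str.isIn ":" x then (s.1, s.2 ++ [x]) else (s.1 ++ [x], s.2))
    = (fun (s : List String × List String) x =>
      ((fun (l : List String) x => if !PySem.Str.isIn ":" x then l ++ [x] else l) s.1 x,
       (fun (l : List String) x => if PySem.Str.isIn ":" x then l ++ [x] else l) s.2 x)) := by
    funext s x
    by_cases hx : PySem.Str.isIn ":" x = true <;>
      simp [hx, -PySem.Str.isIn_eq]
  rw [h, PySem.List.foldl_prod_mk
        (f := fun (l : List String) x => if !PySem.Str.isIn ":" x then l ++ [x] else l)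
        (g := fun (l : List String) x => if PySem.Str.isIn ":" x then l ++ [x] else l),
      PySem.List.foldl_append_if_eq_filter, PySem.List.foldl_append_if_eq_filter]
  rfl

-- the open-tag prefix and close-tag suffix of a list of list-tags, recursively
def tagS : List String → String
  | [] => ""
  | x :: l => "<" ++ ltagLookup x ++ ">" ++ tagS l

def tagE : List String → String
  | [] => ""
  | x :: l => tagE l ++ ("</" ++ ltagLookup x ++ ">")

theorem joinE_cons (a : String) (l : List String) :
    PySem.Str.join "" (a :: l) = a ++ PySem.Str.join "" l := by
  cases l with
  | nil => simp [PySem.Str.join, PySem.Chars.join, List.intercalate]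
  | cons b t =>
    have h := PySem.Chars.join_cons_cons "".toList a.toList b.toList (t.map String.toList)
    simp only [String.toList_empty, List.append_nil] at h
    simp [PySem.Str.join, h, String.ofList_append]

theorem joinE_nil : PySem.Str.join "" ([] : List String) = "" := by
  simp [PySem.Str.join, PySem.Chars.join, List.intercalate]

theorem joinE_append (u v : List String) :
    PySem.Str.join "" (u ++ v) = PySem.Str.join "" u ++ PySem.Str.join "" v := by
  induction u with
  | nil => simp [joinE_nil]
  | cons a t ih => simp [joinE_cons, ih, String.append_assoc]

theorem tagS_eq (lt : List String) :
    PySem.Str.join "" (lt.map (fun x => "<" ++ ltagLookup x ++ ">")) = tagS lt := by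
  induction lt with
  | nil => simp [joinE_nil, tagS]
  | cons a t ih => simp [joinE_cons, ih, tagS]

theorem tagE_eq (lt : List String) :
    PySem.Str.join "" (lt.reverse.map (fun x => "</" ++ ltagLookup x ++ ">")) = tagE lt := by
  induction lt with
  | nil => simp [joinE_nil, tagE]
  | cons a t ih =>
    simp only [List.reverse_cons, List.map_append, joinE_append, ih, List.map_cons,
      List.map_nil, tagE, joinE_cons, joinE_nil]
    simp [String.append_assoc]

-- characterisation of B's recursive pass by A's filters
theorem goTag_eq (content : String) (parts : List String) :
    goTag content parts
    = (tagS (parts.filter (fun x => !PySem.Str.isIn ":" x)) ++ content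
         ++ tagE (parts.filter (fun x => !PySem.Str.isIn ":" x)),
       parts.filter (fun x => PySem.Str.isIn ":" x)) := by
  induction parts with
  | nil => simp [goTag, tagS, tagE]
  | cons x t ih =>
    by_cases hx : PySem.Str.isIn ":" x = true <;>
      simp [goTag, ih, hx, tagS, tagE, String.append_assoc, -PySem.Str.isIn_eq]

-- ===== VERDICT =====
theorem taggedMaker_spec : Claim_equal_taggedMaker := by
  intro style content _ _
  unfold Spec_taggedMaker taggedMaker taggedMaker_alt
  by_cases hs : style = ""
  · simp [hs]
  · simp only [hs, if_false]
    rw [partition_eq, goTag_eq, tagS_eq, tagE_eq]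
    set lt := ((PySem.Str.split? style ";").getD []).filter (fun x => !PySem.Str.isIn ":" x) with hlt
    set ht := ((PySem.Str.split? style ";").getD []).filter (fun x => PySem.Str.isIn ":" x) with hht
    by_cases h1 : lt = [] <;> by_cases h2 : ht = [] <;>
      simp [h1, h2, tagS, tagE, String.append_assoc]
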